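-- pv_equiv track=rewrite | github.com/HyoTaek-Jang/Algorithm_Basic | kakao brain.py | initSeparation
-- ===== SOURCE A (Python) =====
-- def initSeparation(a, b):
--     separation = [[[a[0], b[0]]]]
--     distances = [[a[0], b[0]]]
--
--     for idx in range(1, len(a)):
--         isInto = False
--         for distanceIdx in range(len(distances)):
--             isInto = True
--             distance = distances[distanceIdx]
--             if a[idx] <= distance[0] and b[idx] >= distance[1]:
--                 distance[0] = a[idx]
--                 distance[1] = b[idx]
--             elif a[idx] <= distance[0] and b[idx] <= distance[1]:
--                 distance[0] = a[idx]
--             elif distance[0] <= a[idx] and b[idx] <= distance[1]: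
--                 pass
--             elif distance[0] <= a[idx] <= distance[1] <= b[idx]:
--                 distance[1] = b[idx]
--             else:
--                 isInto = False
--
--             if isInto:
--                 separation[distanceIdx].append([a[idx], b[idx]])
--                 break
--         if not isInto:
--             separation.append([[a[idx], b[idx]]])
--             distances.append([a[idx], b[idx]])
--
--     return distances
-- ===== SOURCE B (Python) =====
-- def initSeparation(a, b):
--     # Pre: a nonempty, len(a) <= len(b) (A raises IndexError otherwise).
--     def place(groups, x, y):
--         if not groups:
--             return [[x, y]]
--         lo, hi = groups[0]
--         if x <= lo or x <= hi or y <= hi: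
--             return [[min(lo, x), max(hi, y)]] + groups[1:]
--         return [groups[0]] + place(groups[1:], x, y)
--
--     groups = [[a[0], b[0]]]
--     for x, y in zip(a[1:], b[1:]):
--         groups = place(groups, x, y)
--     return groups
-- ===== Notes on version B (the rewrite author's own statement) =====
-- stated objective: simpler
-- what changed: B replaces A's in-place four-branch case analysis with parallel separation/distances bookkeeping and an isInto flag by a single recursive first-fit insertion over immutable group list: one unified merge test (x <= lo or x <= hi or y <= hi) and a min/max merge, dropping the unused separation structure entirely.
import Mathlib
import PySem

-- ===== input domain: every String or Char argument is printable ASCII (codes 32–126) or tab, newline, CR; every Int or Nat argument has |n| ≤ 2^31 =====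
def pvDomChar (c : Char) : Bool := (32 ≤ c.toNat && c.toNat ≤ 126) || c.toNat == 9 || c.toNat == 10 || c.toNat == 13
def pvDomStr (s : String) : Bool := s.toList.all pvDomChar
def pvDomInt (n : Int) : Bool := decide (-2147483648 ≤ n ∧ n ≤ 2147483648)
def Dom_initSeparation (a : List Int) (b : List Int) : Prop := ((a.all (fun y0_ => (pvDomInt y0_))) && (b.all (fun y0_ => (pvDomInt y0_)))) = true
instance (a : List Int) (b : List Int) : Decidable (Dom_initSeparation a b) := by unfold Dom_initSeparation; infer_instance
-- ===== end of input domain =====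

-- B replaces A's in-place four-branch merge scan (with its unused 'separation' bookkeeping and
-- isInto flag) by a simpler recursive first-fit insertion with one unified test and min/max merge.


-- ===== PORT A =====
-- Each Python 2-list [lo, hi] is modelled as a pair (lo, hi); the return converts back to 2-lists.
-- State: (distances, separation).  The inner 'for distanceIdx … break' loop of A,
-- returning 'some' of the updated state if some group matched (break), 'none' if the
-- loop finished with isInto = False.
def innerA (x y : Int) : List (Int × Int) → List (List (Int × Int)) →
    Option (List (Int × Int) × List (List (Int × Int)))
  | (d0, d1) :: ds, s :: ss =>
      if x ≤ d0 ∧ y ≥ d1 then some ((x, y) :: ds, (s ++ [(x, y)]) :: ss)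
      else if x ≤ d0 ∧ y ≤ d1 then some ((x, d1) :: ds, (s ++ [(x, y)]) :: ss)
      else if d0 ≤ x ∧ y ≤ d1 then some ((d0, d1) :: ds, (s ++ [(x, y)]) :: ss)
      else if d0 ≤ x ∧ x ≤ d1 ∧ d1 ≤ y then some ((d0, y) :: ds, (s ++ [(x, y)]) :: ss)
      else
        match innerA x y ds ss with
        | some (ds', ss') => some ((d0, d1) :: ds', s :: ss')
        | none => none
  | _, _ => none

-- body of A's outer loop for element (x, y) = (a[idx], b[idx])
def stepA (st : List (Int × Int) × List (List (Int × Int))) (x y : Int) :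
    List (Int × Int) × List (List (Int × Int)) :=
  match innerA x y st.1 st.2 with
  | some st' => st'
  | none => (st.1 ++ [(x, y)], st.2 ++ [[(x, y)]])

-- a[0], b[0] via pyGetD with default 0: Pre_ guarantees both indexings are in range,
-- exactly where Python A does not raise.
def initSeparation (a : List Int) (b : List Int) : List (List Int) :=
  ((PySem.List.pyRange 1 (PySem.List.len a) 1).foldl
      (fun st idx => stepA st (PySem.List.pyGetD a idx 0) (PySem.List.pyGetD b idx 0))
      ([(PySem.List.pyGetD a 0 0, PySem.List.pyGetD b 0 0)],
       [[(PySem.List.pyGetD a 0 0, PySem.List.pyGetD b 0 0)]])).1.map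
    (fun d => [d.1, d.2])

-- ===== PORT B =====
-- Source B's 'place': insert (x, y) into the first group it can join, else recurse on the tail.
def placeB : List (Int × Int) → Int → Int → List (Int × Int)
  | [], x, y => [(x, y)]
  | (lo, hi) :: rest, x, y =>
      if x ≤ lo ∨ x ≤ hi ∨ y ≤ hi then (min lo x, max hi y) :: rest
      else (lo, hi) :: placeB rest x y

def initSeparation_alt (a : List Int) (b : List Int) : List (List Int) :=
  match a, b with
  | x0 :: xs, y0 :: ys =>
      ((xs.zip ys).foldl (fun gs p => placeB gs p.1 p.2) [(x0, y0)]).map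
        (fun g => [g.1, g.2])
  | _, _ => []

-- ===== PRECONDITION & SPEC =====
-- Pre_ excludes exactly the inputs where Python A raises IndexError: empty a (a[0]) or
-- len(b) < len(a) (b[idx] out of range).
def Pre_initSeparation (a : List Int) (b : List Int) : Prop := a ≠ [] ∧ a.length ≤ b.length
instance (a : List Int) (b : List Int) : Decidable (Pre_initSeparation a b) := by
  unfold Pre_initSeparation; infer_instance

def pvWitness_initSeparation : List Int × List Int := ([1, 5, 2], [3, 6, 10])

def Spec_initSeparation (a : List Int) (b : List Int) (out : List (List Int)) : Prop :=
  out = initSeparation_alt a b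
instance (a : List Int) (b : List Int) (out : List (List Int)) :
    Decidable (Spec_initSeparation a b out) := by unfold Spec_initSeparation; infer_instance

-- ===== CLAIM (what is proved, stated in full; the proofs are below) =====
def Claim_equal_initSeparation : Prop := ∀ (a : List Int) (b : List Int),
  Dom_initSeparation a b → Pre_initSeparation a b →
  Spec_initSeparation a b (initSeparation a b)

-- ===== LEMMAS AND PROOFS =====

-- A's inner loop (value of 'distances' after it, whether or not it broke) computes B's place.
lemma innerA_eq_placeB (x y : Int) :
    ∀ (ds : List (Int × Int)) (ss : List (List (Int × Int))), ds.length = ss.length →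
    (match innerA x y ds ss with
     | some st => st.1
     | none => ds ++ [(x, y)]) = placeB ds x y := by
  intro ds
  induction ds with
  | nil =>
    intro ss h
    cases ss with
    | nil => simp [innerA, placeB]
    | cons s ss => simp at h
  | cons d ds ih =>
    intro ss h
    obtain ⟨d0, d1⟩ := d
    cases ss with
    | nil => simp at h
    | cons s ss =>
      simp only [List.length_cons, Nat.add_right_cancel_iff] at h
      simp only [innerA]
      split_ifs with h1 h2 h3 h4
      · simp only [placeB]
        rw [if_pos (by omega)]
        simp only [List.cons.injEq, Prod.mk.injEq]
        exact ⟨⟨by omega, by omega⟩, trivial⟩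
      · simp only [placeB]
        rw [if_pos (by omega)]
        simp only [List.cons.injEq, Prod.mk.injEq]
        exact ⟨⟨by omega, by omega⟩, trivial⟩
      · simp only [placeB]
        rw [if_pos (by omega)]
        simp only [List.cons.injEq, Prod.mk.injEq]
        exact ⟨⟨by omega, by omega⟩, trivial⟩
      · simp only [placeB]
        rw [if_pos (by omega)]
        simp only [List.cons.injEq, Prod.mk.injEq]
        exact ⟨⟨by omega, by omega⟩, trivial⟩
      · have hrec := ih ss h
        simp only [placeB]
        rw [if_neg (by omega)]
        cases hc : innerA x y ds ss with
        | some st' =>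
          rw [hc] at hrec
          simp only []
          obtain ⟨ds', ss'⟩ := st'
          simp only at hrec ⊢
          rw [← hrec]
        | none =>
          rw [hc] at hrec
          simp only [List.cons_append]
          rw [← hrec]

-- the inner loop preserves the lengths of both lists when it breaks
lemma innerA_some_lengths (x y : Int) :
    ∀ (ds : List (Int × Int)) (ss : List (List (Int × Int)))
      (st' : List (Int × Int) × List (List (Int × Int))),
    innerA x y ds ss = some st' → st'.1.length = ds.length ∧ st'.2.length = ss.length := by
  intro ds
  induction ds with
  | nil =>
    intro ss st' h
    cases ss <;> simp [innerA] at h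
  | cons d ds ih =>
    intro ss st' h
    obtain ⟨d0, d1⟩ := d
    cases ss with
    | nil => simp [innerA] at h
    | cons s ss =>
      simp only [innerA] at h
      split_ifs at h with h1 h2 h3 h4
      · cases h; exact ⟨by simp, by simp⟩
      · cases h; exact ⟨by simp, by simp⟩
      · cases h; exact ⟨by simp, by simp⟩
      · cases h; exact ⟨by simp, by simp⟩
      · cases hc : innerA x y ds ss with
        | some st'' =>
          rw [hc] at h
          obtain ⟨ds', ss'⟩ := st''
          cases h
          have := ih ss (ds', ss') hc
          exact ⟨by simpa using this.1, by simpa using this.2⟩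
        | none => rw [hc] at h; cases h

-- folding A's step and folding B's place over the same pair list give the same distances
lemma foldA_foldB :
    ∀ (L : List (Int × Int)) (st : List (Int × Int) × List (List (Int × Int))),
    st.1.length = st.2.length →
    (L.foldl (fun st p => stepA st p.1 p.2) st).1 =
      L.foldl (fun gs p => placeB gs p.1 p.2) st.1 := by
  intro L
  induction L with
  | nil => intro st h; rfl
  | cons p L ih =>
    intro st h
    simp only [List.foldl_cons]
    have hstep : (stepA st p.1 p.2).1 = placeB st.1 p.1 p.2 := by
      have := innerA_eq_placeB p.1 p.2 st.1 st.2 h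
      unfold stepA
      cases hc : innerA p.1 p.2 st.1 st.2 with
      | some st' => rw [hc] at this; simpa using this
      | none => rw [hc] at this; simpa using this
    have hlen : (stepA st p.1 p.2).1.length = (stepA st p.1 p.2).2.length := by
      unfold stepA
      cases hc : innerA p.1 p.2 st.1 st.2 with
      | some st' =>
        have := innerA_some_lengths p.1 p.2 st.1 st.2 st' hc
        simp [this.1, this.2, h]
      | none => simp [h]
    rw [ih _ hlen, hstep]

-- the index fold of A over range(1, len(a)) is a fold over zip of the dropped lists
lemma fold_idx_zip {σ : Type} (F : σ → Int → Int → σ) (a b : List Int)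
    (hab : a.length ≤ b.length) :
    ∀ (n k : Nat) (st : σ), a.length ≤ k + n →
    (PySem.List.pyRange (k : Int) (PySem.List.len a) 1).foldl
        (fun st idx => F st (PySem.List.pyGetD a idx 0) (PySem.List.pyGetD b idx 0)) st
      = ((a.drop k).zip (b.drop k)).foldl (fun st p => F st p.1 p.2) st := by
  intro n
  induction n with
  | zero =>
    intro k st hk
    rw [PySem.List.pyRange_one_eq_nil (by simp; exact_mod_cast by omega)]
    rw [List.drop_eq_nil_of_le (by omega)]
    simp
  | succ n ih =>
    intro k st hk
    by_cases hka : k < a.length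
    · rw [PySem.List.pyRange_one_cons (by simp; exact_mod_cast hka)]
      simp only [List.foldl_cons]
      rw [show ((k : Int) + 1) = ((k + 1 : Nat) : Int) by push_cast; ring]
      rw [ih (k + 1) _ (by omega)]
      rw [List.drop_eq_getElem_cons hka, List.drop_eq_getElem_cons (lt_of_lt_of_le hka hab)]
      simp only [List.zip_cons_cons, List.foldl_cons]
      rw [PySem.List.pyGetD_natCast, PySem.List.pyGetD_natCast]
      rw [List.getD_eq_getElem _ _ hka, List.getD_eq_getElem _ _ (lt_of_lt_of_le hka hab)]
    · rw [PySem.List.pyRange_one_eq_nil (by simp; exact_mod_cast by omega)]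
      rw [List.drop_eq_nil_of_le (by omega)]
      simp

-- ===== VERDICT (by name: the statement is the Claim_ definition above) =====
theorem initSeparation_spec : Claim_equal_initSeparation := by
  intro a b _hdom hpre
  obtain ⟨hne, hlen⟩ := hpre
  unfold Spec_initSeparation
  cases a with
  | nil => exact absurd rfl hne
  | cons x0 xs =>
    cases b with
    | nil => simp at hlen
    | cons y0 ys =>
      simp only [List.length_cons, Nat.add_le_add_iff_right] at hlen
      unfold initSeparation initSeparation_alt
      have h0a : PySem.List.pyGetD (x0 :: xs) 0 0 = x0 := by
        simp [PySem.List.pyGetD_ofNat']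
      have h0b : PySem.List.pyGetD (y0 :: ys) 0 0 = y0 := by
        simp [PySem.List.pyGetD_ofNat']
      rw [h0a, h0b]
      have hab : (x0 :: xs).length ≤ (y0 :: ys).length := by
        simp only [List.length_cons]; omega
      have hfold := fold_idx_zip stepA (x0 :: xs) (y0 :: ys) hab xs.length 1
        ([(x0, y0)], [[(x0, y0)]]) (by simp)
      simp only [Nat.cast_one, List.drop_one, List.tail_cons] at hfold
      rw [hfold, foldA_foldB (xs.zip ys) _ (by simp)]
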